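-- pv_equiv track=rewrite | github.com/cubyto/Fundamentals-computing | matrix/exercices-5.py | sum_cols
-- ===== SOURCE A (Python) =====
-- def sum_cols(matrix) -> dict:
--     sum_cols_dict = {}
--     for cols in range(len(matrix)):
--         cols_in_row = []
--         sum_cols_by_row = 0
--         for rows in range(len(matrix)):
--             sum_cols_by_row += matrix[rows][cols]
--             cols_in_row.append(matrix[rows][cols])
--         sum_cols_dict[f"{cols_in_row}"] = sum_cols_by_row
--     return sum_cols_dict
-- ===== SOURCE B (Python) =====
-- def sum_cols(matrix) -> dict:
--     n = len(matrix)
--     columns = [[] for _ in range(n)]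
--     for r in range(n):
--         row = matrix[r]
--         for c in range(n):
--             columns[c].append(row[c])
--     return {f"{col}": sum(col) for col in columns}
-- ===== Notes on version B (the rewrite author's own statement) =====
-- stated objective: alternative
-- what changed: B replaces A's column-major nested loops (which rebuild each column and its running sum per outer iteration, inserting into the dict as it goes) by a single row-major scan that accumulates all n columns at once in an array of lists, with the sums and the dict built afterwards from the finished columns.
import Mathlib
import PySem

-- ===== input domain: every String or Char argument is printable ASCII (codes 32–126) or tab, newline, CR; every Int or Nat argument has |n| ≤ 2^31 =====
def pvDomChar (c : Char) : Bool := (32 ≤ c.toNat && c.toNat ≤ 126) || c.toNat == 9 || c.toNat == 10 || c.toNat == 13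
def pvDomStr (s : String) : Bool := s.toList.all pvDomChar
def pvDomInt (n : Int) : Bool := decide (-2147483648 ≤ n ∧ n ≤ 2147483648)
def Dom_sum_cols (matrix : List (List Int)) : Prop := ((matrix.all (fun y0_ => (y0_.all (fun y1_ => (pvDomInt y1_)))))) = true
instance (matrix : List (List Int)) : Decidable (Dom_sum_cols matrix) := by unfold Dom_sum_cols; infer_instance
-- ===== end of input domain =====

-- B: one row-major scan accumulating all columns at once, sums and dict built afterwards,
-- instead of A's column-major nested loops with running sums and incremental dict inserts.


-- shared key formatter: f"{cols_in_row}" / f"{col}" on a list of ints, e.g. "[1, -2]"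
-- (exact for int lists: Python repr = '[' ++ ', '-separated str(n) ++ ']'; built on List Char, PySem.Int.toChars = str(n))
def pyReprIntList (xs : List Int) : String :=
  String.ofList ('[' :: List.intercalate [',', ' '] (xs.map PySem.Int.toChars) ++ [']'])

-- ===== PORT A =====
def sum_cols (matrix : List (List Int)) : List (String × Int) :=
  ((PySem.List.pyRange 0 (matrix.length : Int) 1).foldl
    (fun (d : PySem.Dict String Int) cols =>
      let st := (PySem.List.pyRange 0 (matrix.length : Int) 1).foldl
        (fun (st : Int × List Int) rows =>
          -- matrix[rows][cols]; pyGetD is exact under Pre_sum_cols (in-range indices)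
          let v := PySem.List.pyGetD (PySem.List.pyGetD matrix rows []) cols 0
          (st.1 + v, st.2 ++ [v]))
        (0, [])
      d.insert (pyReprIntList st.2) st.1)
    PySem.Dict.empty).items

-- ===== PORT B =====
def sum_cols_alt (matrix : List (List Int)) : List (String × Int) :=
  let n : Int := (matrix.length : Int)
  let columns0 : List (List Int) := (PySem.List.pyRange 0 n 1).map (fun _ => ([] : List Int))
  let columns := (PySem.List.pyRange 0 n 1).foldl
    (fun cols r =>
      let row := PySem.List.pyGetD matrix r []
      (PySem.List.pyRange 0 n 1).foldl
        (fun cols c =>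
          -- columns[c].append(row[c]); indices are in range under Pre_sum_cols
          PySem.List.pySetD cols c (PySem.List.pyGetD cols c [] ++ [PySem.List.pyGetD row c 0]))
        cols)
    columns0
  (columns.foldl
    (fun (d : PySem.Dict String Int) col => d.insert (pyReprIntList col) col.sum)
    PySem.Dict.empty).items

-- ===== PRECONDITION & SPEC =====
-- Pre_ excludes exactly the inputs on which the Python raises IndexError: some row shorter than len(matrix).
def Pre_sum_cols (matrix : List (List Int)) : Prop := ∀ row ∈ matrix, matrix.length ≤ row.length
instance (matrix : List (List Int)) : Decidable (Pre_sum_cols matrix) := by unfold Pre_sum_cols; infer_instance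

def pvWitness_sum_cols : List (List Int) := [[1, 2], [3, 4]]

def Spec_sum_cols (matrix : List (List Int)) (out : List (String × Int)) : Prop := out = sum_cols_alt matrix
instance (matrix : List (List Int)) (out : List (String × Int)) : Decidable (Spec_sum_cols matrix out) := by unfold Spec_sum_cols; infer_instance

-- ===== CLAIM (what is proved, stated in full; the proofs are below) =====
def Claim_equal_sum_cols : Prop := ∀ (matrix : List (List Int)), Dom_sum_cols matrix → Pre_sum_cols matrix → Spec_sum_cols matrix (sum_cols matrix)

-- ===== LEMMAS AND PROOFS =====

def pvEntry (matrix : List (List Int)) (r c : Int) : Int :=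
  PySem.List.pyGetD (PySem.List.pyGetD matrix r []) c 0

def pvCol (matrix : List (List Int)) (c : Int) : List Int :=
  (PySem.List.pyRange 0 (matrix.length : Int) 1).map (fun r => pvEntry matrix r c)

lemma set_map_pyRange {α : Type} (n : Nat) (F : Int → α) (j : Nat) (_hj : j < n) (v : α) :
    ((PySem.List.pyRange 0 (n : Int) 1).map F).set j v
      = (PySem.List.pyRange 0 (n : Int) 1).map (fun c => if c = (j : Int) then v else F c) := by
  apply List.ext_getElem
  · simp
  · intro i h1 h2
    simp only [List.getElem_set, List.getElem_map]
    have hi : i < n := by simpa [PySem.List.length_pyRange_one] using (by simpa using h2 : i < ((PySem.List.pyRange 0 (n:Int) 1).map F).length)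
    rw [PySem.List.getElem_pyRange_one]
    by_cases hij : j = i
    · simp [hij]
    · have h' : ¬ i = j := fun h => hij h.symm
      have h'' : ¬ ((0:Int) + i = (j:Int)) := by omega
      simp [hij, h']

lemma innerB (n : Nat) (f : Int → List Int) (w : Int → Int) :
    ∀ m : Nat, m ≤ n →
    (PySem.List.pyRange 0 (m : Int) 1).foldl
      (fun cols c => PySem.List.pySetD cols c (PySem.List.pyGetD cols c [] ++ [w c]))
      ((PySem.List.pyRange 0 (n : Int) 1).map f)
    = (PySem.List.pyRange 0 (n : Int) 1).map (fun c => if c < (m : Int) then f c ++ [w c] else f c) := by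
  intro m
  induction m with
  | zero =>
    intro _
    simp only [Nat.cast_zero, PySem.List.pyRange_one_eq_nil (le_refl 0), List.foldl_nil]
    apply List.map_congr_left
    intro c hc
    have := (PySem.List.mem_pyRange_one).1 hc
    have : ¬ (c < (0:Int)) := by omega
    simp [this]
  | succ m ih =>
    intro hm
    have hm' : m ≤ n := by omega
    have hpeel : PySem.List.pyRange 0 ((m+1 : Nat) : Int) 1
        = PySem.List.pyRange 0 (m : Int) 1 ++ [(m : Int)] := by
      push_cast
      exact PySem.List.pyRange_one_succ_right (by positivity)
    rw [hpeel, List.foldl_append, List.foldl_cons, List.foldl_nil, ih hm']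
    rw [PySem.List.pyGetD_map_pyRange _ n m _ (by omega)]
    have hsetD : PySem.List.pySetD
        ((PySem.List.pyRange 0 (n : Int) 1).map (fun c => if c < (m : Int) then f c ++ [w c] else f c))
        ((m : Nat) : Int)
        ((if (m:Int) < (m : Int) then f m ++ [w m] else f m) ++ [w m]) = _ := PySem.List.pySetD_natCast ..
    rw [hsetD, set_map_pyRange n _ m (by omega)]
    apply List.map_congr_left
    intro c hc
    have hcr := (PySem.List.mem_pyRange_one).1 hc
    by_cases h1 : c = (m : Int)
    · simp [h1]
    · have h2 : (c < (m:Int)) ↔ (c < (m:Int) + 1) := by omega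
      push_cast
      simp only [h1, if_false]
      by_cases h3 : c < (m : Int)
      · simp [h3, h2.mp h3]
      · have : ¬ (c < (m:Int)+1) := by omega
        simp [h3, this]

lemma outerB (matrix : List (List Int)) :
    ∀ m : Nat, m ≤ matrix.length →
    (PySem.List.pyRange 0 (m : Int) 1).foldl
      (fun cols r =>
        let row := PySem.List.pyGetD matrix r []
        (PySem.List.pyRange 0 (matrix.length : Int) 1).foldl
          (fun cols c =>
            PySem.List.pySetD cols c (PySem.List.pyGetD cols c [] ++ [PySem.List.pyGetD row c 0]))
          cols)
      ((PySem.List.pyRange 0 (matrix.length : Int) 1).map (fun _ => ([] : List Int)))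
    = (PySem.List.pyRange 0 (matrix.length : Int) 1).map
        (fun c => (PySem.List.pyRange 0 (m : Int) 1).map (fun r => pvEntry matrix r c)) := by
  intro m
  induction m with
  | zero =>
    intro _
    simp [PySem.List.pyRange_one_eq_nil (le_refl (0:Int))]
  | succ m ih =>
    intro hm
    have hm' : m ≤ matrix.length := by omega
    have hpeel : PySem.List.pyRange 0 ((m+1 : Nat) : Int) 1
        = PySem.List.pyRange 0 (m : Int) 1 ++ [(m : Int)] := by
      push_cast
      exact PySem.List.pyRange_one_succ_right (by positivity)
    rw [hpeel, List.foldl_append, List.foldl_cons, List.foldl_nil, ih hm']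
    show (PySem.List.pyRange 0 (matrix.length : Int) 1).foldl
        (fun cols c => PySem.List.pySetD cols c
          (PySem.List.pyGetD cols c [] ++ [PySem.List.pyGetD (PySem.List.pyGetD matrix (m : Int) []) c 0])) _ = _
    rw [innerB matrix.length _ _ matrix.length (le_refl _)]
    apply List.map_congr_left
    intro c hc
    have hcr := (PySem.List.mem_pyRange_one).1 hc
    have hlt : c < (matrix.length : Int) := hcr.2
    simp [hlt, pvEntry]

lemma innerA (matrix : List (List Int)) (cols : Int) :
    (PySem.List.pyRange 0 (matrix.length : Int) 1).foldl
      (fun (st : Int × List Int) rows =>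
        let v := PySem.List.pyGetD (PySem.List.pyGetD matrix rows []) cols 0
        (st.1 + v, st.2 ++ [v]))
      (0, [])
    = ((pvCol matrix cols).sum, pvCol matrix cols) := by
  show (PySem.List.pyRange 0 (matrix.length : Int) 1).foldl
      (fun (st : Int × List Int) e => (st.1 + pvEntry matrix e cols, st.2 ++ [pvEntry matrix e cols]))
      (0, []) = _
  rw [PySem.List.foldl_prod_mk (f := fun a e => a + pvEntry matrix e cols)
      (g := fun acc e => acc ++ [pvEntry matrix e cols])]
  rw [PySem.List.foldl_add, PySem.List.foldl_append_singleton_eq_map]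
  simp [pvCol]


theorem sum_cols_eq (matrix : List (List Int)) : sum_cols matrix = sum_cols_alt matrix := by
  simp only [sum_cols, sum_cols_alt]
  rw [outerB matrix matrix.length (le_refl _), List.foldl_map]
  apply congrArg PySem.Dict.items
  apply PySem.List.foldl_congr_mem
  intro d c _
  simp only [innerA matrix c, pvCol]

-- ===== VERDICT (by name: the statement is the Claim_ definition above) =====
theorem sum_cols_spec : Claim_equal_sum_cols :=
  fun matrix _ _ => sum_cols_eq matrix
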